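-- pv_equiv track=rewrite | github.com/acarrasco/programa_conmigo | ep050/hr_cards_permutation_brute_2.py | lehmer_to_factorial
-- ===== SOURCE A (Python) =====
-- def lehmer_to_factorial(code):
--     """
--     >>> lehmer_to_factorial([0, 0, 0])
--     0
--
--     >>> lehmer_to_factorial([1, 0, 0])
--     2
--
--     >>> lehmer_to_factorial([2, 1, 0])
--     5
--     """
--     base = 1
--     result = 0
--     for pos in range(1, len(code)):
--         base *= pos
--         i = len(code) - 1 - pos
--         result += base * code[i]
--     return result
-- ===== SOURCE B (Python) =====
-- def lehmer_to_factorial(code):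
--     # Left-to-right Horner evaluation: one running accumulator, no factorial.
--     n = len(code)
--     if n < 2:
--         return 0
--     acc = code[0]
--     for k in range(1, n - 1):
--         acc = acc * (n - k) + code[k]
--     return acc
-- ===== Notes on version B (the rewrite author's own statement) =====
-- stated objective: alternative
-- what changed: Replaces the reversed factorial-base accumulation (running factorial times code[len-1-pos], summed) with a left-to-right recursive Horner evaluation that keeps a single accumulator and never computes a factorial.
import Mathlib
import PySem

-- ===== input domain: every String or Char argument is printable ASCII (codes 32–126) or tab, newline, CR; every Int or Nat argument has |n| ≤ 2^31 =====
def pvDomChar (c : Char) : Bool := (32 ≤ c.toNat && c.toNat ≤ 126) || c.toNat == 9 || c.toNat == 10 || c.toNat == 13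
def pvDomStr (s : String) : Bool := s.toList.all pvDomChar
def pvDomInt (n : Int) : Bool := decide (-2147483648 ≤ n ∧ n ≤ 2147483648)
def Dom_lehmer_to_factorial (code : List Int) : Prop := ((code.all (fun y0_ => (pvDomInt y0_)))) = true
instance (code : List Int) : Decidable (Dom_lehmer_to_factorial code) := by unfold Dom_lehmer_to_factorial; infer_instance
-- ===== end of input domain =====

-- B replaces A's reversed factorial-base accumulation by a left-to-right recursive
-- Horner evaluation that keeps one running accumulator and no explicit factorial
-- (objective: alternative decomposition; same O(n) cost).

-- ===== PORT A =====
-- A: base/result accumulation over range(1, len(code)), reading code[len-1-pos]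
-- (always in range, so the total pyGetD form is exact).
def lehmer_to_factorial (code : List Int) : Int :=
  ((PySem.List.pyRange 1 (code.length : Int) 1).foldl
    (fun (st : Int × Int) pos =>
      let base := st.1 * pos
      (base, st.2 + base * PySem.List.pyGetD code ((code.length : Int) - 1 - pos) 0))
    (1, 0)).2

-- ===== PORT B =====
-- B: acc = code[0]; for k in range(1, n-1): acc = acc*(n-k) + code[k]
-- (indices 0 and k are always in range, so the total pyGetD form is exact).
def lehmer_to_factorial_alt (code : List Int) : Int :=
  if code.length < 2 then 0
  else
    (PySem.List.pyRange 1 ((code.length : Int) - 1) 1).foldl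
      (fun acc k => acc * ((code.length : Int) - k) + PySem.List.pyGetD code k 0)
      (PySem.List.pyGetD code 0 0)

-- ===== PRECONDITION & SPEC =====
def Spec_lehmer_to_factorial (code : List Int) (out : Int) : Prop := out = lehmer_to_factorial_alt code
instance (code : List Int) (out : Int) : Decidable (Spec_lehmer_to_factorial code out) := by unfold Spec_lehmer_to_factorial; infer_instance

-- ===== CLAIM (what is proved, stated in full; the proofs are below) =====
def Claim_equal_lehmer_to_factorial : Prop := ∀ (code : List Int), Dom_lehmer_to_factorial code → Spec_lehmer_to_factorial code (lehmer_to_factorial code)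

-- ===== LEMMAS AND PROOFS =====

def pvFactI (k : Nat) : Int := (Nat.factorial k : Int)

-- Proof-side view of B's loop: Horner on the remaining suffix of the list.
def pvHorner (acc : Int) : List Int → Int
  | [] => acc
  | [_] => acc
  | x :: y :: ys => pvHorner (acc * ((ys.length : Int) + 2) + x) (y :: ys)

lemma pvHorner_short (acc : Int) (l : List Int) (h : l.length ≤ 1) :
    pvHorner acc l = acc := by
  cases l with
  | nil => rfl
  | cons x xs => cases xs with
    | nil => rfl
    | cons y ys => simp at h

-- B's fold from index a onward is Horner on code.drop a.
lemma pvFold_horner (code : List Int) : ∀ (t a : Nat) (acc : Int),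
    code.length - 1 - a = t →
    (PySem.List.pyRange (a : Int) ((code.length : Int) - 1) 1).foldl
      (fun acc k => acc * ((code.length : Int) - k) + PySem.List.pyGetD code k 0) acc
    = pvHorner acc (code.drop a) := by
  intro t
  induction t with
  | zero =>
      intro a acc h
      rw [PySem.List.pyRange_one_eq_nil (by omega)]
      rw [pvHorner_short acc _ (by simp; omega)]
      rfl
  | succ u ih =>
      intro a acc h
      have ha : (a : Int) < (code.length : Int) - 1 := by omega
      rw [PySem.List.pyRange_one_cons ha, List.foldl_cons]
      have hlt : a < code.length := by omega
      have hget : PySem.List.pyGetD code (a : Int) 0 = code[a] := by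
        rw [PySem.List.pyGetD_natCast]; exact List.getD_eq_getElem code 0 hlt
      have hdrop : code.drop a = code[a] :: code.drop (a + 1) := List.drop_eq_getElem_cons hlt
      obtain ⟨y, ys, hys⟩ : ∃ y ys, code.drop (a + 1) = y :: ys := by
        cases hd : code.drop (a + 1) with
        | nil => exfalso; have := List.length_drop (l := code) (i := a + 1); rw [hd] at this; simp at this; omega
        | cons y ys => exact ⟨y, ys, rfl⟩
      have hyslen : (ys.length : Int) + 2 = (code.length : Int) - (a : Int) := by
        have := List.length_drop (l := code) (i := a + 1)
        rw [hys] at this; simp at this; omega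
      rw [hdrop, hys, pvHorner, hyslen, hget]
      have := ih (a + 1) (acc * ((code.length : Int) - (a : Int)) + code[a]) (by omega)
      rw [hys] at this
      rw [show ((a : Int) + 1) = ((a + 1 : Nat) : Int) by push_cast; ring]
      exact this

-- B equals Horner on the tail.
lemma pvAlt_horner (c : Int) (rest : List Int) (hne : rest ≠ []) :
    lehmer_to_factorial_alt (c :: rest) = pvHorner c rest := by
  have hr : 0 < rest.length := List.length_pos_of_ne_nil hne
  unfold lehmer_to_factorial_alt
  rw [if_neg (by simp; omega)]
  have h := pvFold_horner (c :: rest) ((c :: rest).length - 1 - 1) 1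
    (PySem.List.pyGetD (c :: rest) 0 0) rfl
  rw [show ((1 : Nat) : Int) = (1 : Int) by norm_num] at h
  rw [h]
  simp [PySem.List.pyGetD_zero_cons]

-- A's fold state after range(1, p+1): base = p!, plus the running sum.
lemma pvFoldA_char (code : List Int) (p : Nat) :
    (PySem.List.pyRange 1 ((p : Int) + 1) 1).foldl
      (fun (st : Int × Int) pos =>
        let base := st.1 * pos
        (base, st.2 + base * PySem.List.pyGetD code ((code.length : Int) - 1 - pos) 0))
      (1, 0)
    = (pvFactI p,
       ((List.range p).map (fun k =>
          pvFactI (k + 1) * PySem.List.pyGetD code ((code.length : Int) - 1 - ((k : Int) + 1)) 0)).sum) := by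
  induction p with
  | zero => simp [PySem.List.pyRange_one_eq_nil, pvFactI, Nat.factorial]
  | succ q ih =>
      have h : PySem.List.pyRange 1 ((q : Int) + 1 + 1) 1
          = PySem.List.pyRange 1 ((q : Int) + 1) 1 ++ [(q : Int) + 1] := by
        have := PySem.List.pyRange_one_succ_right (a := 1) (b := (q : Int) + 1) (by omega)
        simpa using this
      rw [show ((q + 1 : Nat) : Int) + 1 = (q : Int) + 1 + 1 by push_cast; ring, h,
        List.foldl_append, ih]
      simp only [List.foldl_cons, List.foldl_nil, List.range_succ, List.map_append,
        List.sum_append, List.map_cons, List.map_nil, List.sum_cons, List.sum_nil,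
        Prod.mk.injEq]
      constructor
      · simp [pvFactI, Nat.factorial_succ]; ring
      · have : pvFactI q * ((q : Int) + 1) = pvFactI (q + 1) := by
          simp [pvFactI, Nat.factorial_succ]; ring
        rw [← this]; ring

-- A as a sum (for code of length p+1).
lemma pvA_sum (code : List Int) (p : Nat) (hl : code.length = p + 1) :
    lehmer_to_factorial code
      = ((List.range p).map (fun k =>
          pvFactI (k + 1) * PySem.List.pyGetD code ((code.length : Int) - 1 - ((k : Int) + 1)) 0)).sum := by
  unfold lehmer_to_factorial
  rw [hl]
  have := pvFoldA_char code p
  rw [hl] at this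
  push_cast at this ⊢
  rw [this]

-- Head recursion for A.
lemma pvA_cons (c : Int) (rest : List Int) (hne : rest ≠ []) :
    lehmer_to_factorial (c :: rest)
      = c * pvFactI rest.length + lehmer_to_factorial rest := by
  obtain ⟨m, hm⟩ : ∃ m, rest.length = m + 1 := by
    cases rest with
    | nil => exact absurd rfl hne
    | cons a l => exact ⟨l.length, rfl⟩
  have hlen : (c :: rest).length = (m + 1) + 1 := by simp [hm]
  rw [pvA_sum (c :: rest) (m + 1) hlen, pvA_sum rest m hm]
  rw [List.range_succ, List.map_append, List.sum_append]
  simp only [List.map_cons, List.map_nil, List.sum_cons, List.sum_nil]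
  have hgc : PySem.List.pyGetD (c :: rest) (((c :: rest).length : Int) - 1 - ((m : Int) + 1)) 0 = c := by
    have : ((c :: rest).length : Int) - 1 - ((m : Int) + 1) = 0 := by
      simp only [List.length_cons, hm]; push_cast; ring
    rw [this, PySem.List.pyGetD_zero_cons]
  rw [hgc]
  have hterm : ∀ k ∈ List.range m,
      pvFactI (k + 1) * PySem.List.pyGetD (c :: rest) (((c :: rest).length : Int) - 1 - ((k : Int) + 1)) 0
      = pvFactI (k + 1) * PySem.List.pyGetD rest ((rest.length : Int) - 1 - ((k : Int) + 1)) 0 := by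
    intro k hk
    have hkm : k < m := List.mem_range.mp hk
    have h1 : ((c :: rest).length : Int) - 1 - ((k : Int) + 1) = ((m - k : Nat) : Int) := by
      simp [hm]; push_cast [Nat.cast_sub hkm.le]; ring
    have h2 : ((rest.length : Int) - 1 - ((k : Int) + 1)) = ((m - 1 - k : Nat) : Int) := by
      rw [hm]; push_cast [Nat.cast_sub (by omega : k ≤ m - 1), Nat.cast_sub (by omega : 1 ≤ m)]; ring
    rw [h1, h2, PySem.List.pyGetD_natCast, PySem.List.pyGetD_natCast]
    have : m - k = (m - 1 - k) + 1 := by omega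
    rw [this, List.getD_cons_succ]
  rw [List.map_congr_left hterm]
  rw [hm]
  ring

-- Horner is affine in its accumulator.
lemma pvHorner_lin (l : List Int) : ∀ a b : Int,
    pvHorner a l = pvHorner b l + (a - b) * pvFactI l.length := by
  induction l with
  | nil => intro a b; simp [pvHorner, pvFactI]
  | cons x xs ih =>
      intro a b
      cases xs with
      | nil => simp [pvHorner, pvFactI]
      | cons y ys =>
          simp only [pvHorner]
          rw [ih (a * ((ys.length : Int) + 2) + x) (b * ((ys.length : Int) + 2) + x)]
          have : pvFactI (ys.length + 1 + 1) = ((ys.length : Int) + 2) * pvFactI (ys.length + 1) := by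
            unfold pvFactI; rw [Nat.factorial_succ]; push_cast; ring
          simp only [List.length_cons, this]
          ring

-- Head recursion for B.
lemma pvB_cons (c : Int) (rest : List Int) (hne : rest ≠ []) :
    lehmer_to_factorial_alt (c :: rest)
      = c * pvFactI rest.length + lehmer_to_factorial_alt rest := by
  cases rest with
  | nil => exact absurd rfl hne
  | cons r rs =>
      rw [pvAlt_horner c (r :: rs) (by simp)]
      cases rs with
      | nil =>
          simp [pvHorner, lehmer_to_factorial_alt, pvFactI]
      | cons y ys =>
          have h0 : lehmer_to_factorial_alt (r :: y :: ys) = pvHorner 0 (r :: y :: ys) := by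
            rw [pvAlt_horner r (y :: ys) (by simp)]
            show _ = pvHorner (0 * ((ys.length : Int) + 2) + r) (y :: ys)
            norm_num
          rw [h0, pvHorner_lin (r :: y :: ys) c 0]
          ring

lemma pvAB (code : List Int) : lehmer_to_factorial code = lehmer_to_factorial_alt code := by
  induction code with
  | nil =>
      simp [lehmer_to_factorial, lehmer_to_factorial_alt,
        PySem.List.pyRange_one_eq_nil (a := 1) (b := 0) (by omega)]
  | cons c rest ih =>
      cases rest with
      | nil =>
          simp [lehmer_to_factorial, lehmer_to_factorial_alt,
            PySem.List.pyRange_one_eq_nil (a := 1) (b := 1) (by omega)]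
      | cons r rs =>
          rw [pvA_cons c (r :: rs) (by simp), pvB_cons c (r :: rs) (by simp), ih]

-- ===== VERDICT (by name: the statement is the Claim_ definition above) =====
theorem lehmer_to_factorial_spec : Claim_equal_lehmer_to_factorial := by
  intro code _
  exact pvAB code
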